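-- pv_equiv track=rewrite | github.com/XinnuoXu/AggGen | src/models/pred_state.py | _get_src_masks
-- ===== SOURCE A (Python) =====
-- def _get_src_masks(seq, bpatts, cand_states, masks, min_f, max_f, patt_score):
--     src_masks = []; seqs = []; bi_patts = []; patt_scores = []
--     for k, bp in enumerate(bpatts):
--         emi_num = sum(bp)
--         if emi_num < min_f or emi_num > max_f:
--             continue
--         cstate = []; s_mask = []
--         for i in range(len(bp)):
--             cstate.append(int(seq[i]))
--             if bp[i] == 1:
--                 try:
--                     idx = cand_states.index(cstate)
--                 except:
--                     del s_mask[:]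
--                     break
--                 s_mask.append(masks[idx])
--                 del cstate[:]
--         if len(s_mask) > 0:
--             src_masks.append(s_mask)
--             seqs.append(seq)
--             bi_patts.append(bp)
--             patt_scores.append(patt_score[k])
--     return src_masks, seqs, bi_patts, patt_scores
-- ===== SOURCE B (Python) =====
-- def _get_src_masks(seq, bpatts, cand_states, masks, min_f, max_f, patt_score):
--     # mask of each candidate state, first occurrence wins
--     state_mask = {}
--     for st, m in zip(cand_states, masks):
--         state_mask.setdefault(tuple(st), m)
--     # pass 1: surviving patterns reduced to their cut-position pairs
--     jobs = []
--     for bp, score in zip(bpatts, patt_score):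
--         if min_f <= sum(bp) <= max_f:
--             cuts = [0] + [i + 1 for i, x in enumerate(bp) if x == 1]
--             jobs.append((bp, score, list(zip(cuts, cuts[1:]))))
--     # pass 2: resolve each distinct coordinate pair once, shared by all patterns
--     table = {}
--     for _, _, pairs in jobs:
--         for p in pairs:
--             if p not in table:
--                 a, b = p
--                 table[p] = state_mask.get(tuple(int(x) for x in seq[a:b]))
--     # pass 3: assemble, all-or-nothing per pattern
--     src_masks = []; seqs = []; bi_patts = []; patt_scores = []
--     for bp, score, pairs in jobs:
--         s_mask = [table[p] for p in pairs]
--         if s_mask and None not in s_mask: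
--             src_masks.append(s_mask); seqs.append(seq)
--             bi_patts.append(bp); patt_scores.append(score)
--     return src_masks, seqs, bi_patts, patt_scores
-- ===== Notes on version B (the rewrite author's own statement) =====
-- stated objective: alternative
-- what changed: B splits A's single interleaved scan into three staged passes: pass 1 reduces each surviving bitpattern to its cut-position pairs, pass 2 resolves every DISTINCT coordinate pair once in a shared table (one state_mask hash built by first occurrence replaces all of A's repeated cand_states.index scans), and pass 3 assembles the four output lists all-or-nothing from the table, so segments are looked up once across patterns instead of per pattern.
-- outside the precondition, e.g. on _get_src_masks([0], [[1]], [], [], 0, 1, []): A returns ([], [], [], []), B returns ([], [], [], []); on _get_src_masks([0], [[1, 1]], [], [], 0, 2, [7]): A returns ([], [], [], []), B returns ([], [], [], [])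
import Mathlib
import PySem

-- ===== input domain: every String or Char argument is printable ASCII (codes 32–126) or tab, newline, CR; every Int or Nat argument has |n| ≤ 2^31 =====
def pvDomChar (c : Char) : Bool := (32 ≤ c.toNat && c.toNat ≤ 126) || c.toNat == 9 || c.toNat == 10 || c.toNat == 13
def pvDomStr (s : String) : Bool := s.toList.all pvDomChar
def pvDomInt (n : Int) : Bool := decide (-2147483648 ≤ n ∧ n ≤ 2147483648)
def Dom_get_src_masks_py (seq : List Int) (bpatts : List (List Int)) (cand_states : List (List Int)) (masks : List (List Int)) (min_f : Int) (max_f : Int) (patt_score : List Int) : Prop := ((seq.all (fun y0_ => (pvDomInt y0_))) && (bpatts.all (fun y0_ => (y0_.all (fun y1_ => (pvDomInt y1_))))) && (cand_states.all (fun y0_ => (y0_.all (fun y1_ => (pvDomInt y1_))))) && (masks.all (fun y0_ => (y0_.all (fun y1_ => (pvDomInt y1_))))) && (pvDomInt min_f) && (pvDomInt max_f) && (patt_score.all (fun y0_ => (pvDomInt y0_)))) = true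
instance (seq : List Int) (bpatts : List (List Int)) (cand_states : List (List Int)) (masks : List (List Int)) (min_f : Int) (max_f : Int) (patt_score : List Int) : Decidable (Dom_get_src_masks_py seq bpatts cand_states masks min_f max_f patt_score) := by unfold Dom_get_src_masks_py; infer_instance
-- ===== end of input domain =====

-- B restructures A's single interleaved loop into three staged passes: surviving patterns
-- are reduced to their cut-position pairs, each distinct pair is resolved once in a shared
-- position table, and the four outputs are assembled all-or-nothing from that table
-- (objective: alternative, same value on Pre_).

-- ===== PORT A =====
-- inner loop 'for i in range(len(bp))': structural recursion on bp carrying i, cstate, s_mask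
def pvALoop (seq : List Int) (cand_states masks : List (List Int)) :
    List Int → Int → List Int → List (List Int) → List (List Int)
  | [], _, _, s_mask => s_mask
  | b :: rest, i, cstate, s_mask =>
    -- cstate.append(int(seq[i])) ; seq[i] IndexError is excluded by Pre_
    let cstate2 := cstate ++ [PySem.List.pyGetD seq i 0]
    if b == 1 then
      match PySem.List.index? cand_states cstate2 with
      | none => []  -- except: del s_mask[:]; break
      | some idx =>
        -- masks[idx] ; IndexError excluded by Pre_
        pvALoop seq cand_states masks rest (i + 1) []
          (s_mask ++ [PySem.List.pyGetD masks (idx : Int) []])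
    else pvALoop seq cand_states masks rest (i + 1) cstate2 s_mask

def get_src_masks_py (seq : List Int) (bpatts : List (List Int)) (cand_states : List (List Int)) (masks : List (List Int)) (min_f : Int) (max_f : Int) (patt_score : List Int) : List (List (List Int)) × List (List Int) × List (List Int) × List Int :=
  (PySem.List.enumerate bpatts 0).foldl
    (fun acc kbp =>
      let emi_num := kbp.2.sum
      if emi_num < min_f ∨ emi_num > max_f then acc
      else
        let s_mask := pvALoop seq cand_states masks kbp.2 0 [] []
        if s_mask.length > 0 then
          (acc.1 ++ [s_mask], acc.2.1 ++ [seq], acc.2.2.1 ++ [kbp.2],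
           -- patt_score[k] ; IndexError excluded by Pre_
           acc.2.2.2 ++ [PySem.List.pyGetD patt_score kbp.1 0])
        else acc)
    ([], [], [], [])

-- ===== PORT B =====
-- state_mask: first-occurrence mask per candidate state (setdefault over zip)
def pvStateMask (cand_states masks : List (List Int)) : PySem.Dict (List Int) (List Int) :=
  (cand_states.zip masks).foldl (fun d p => d.setdefault p.1 p.2) PySem.Dict.empty

-- pass 1: surviving patterns reduced to their cut-position pairs
def pvJobs (bpatts : List (List Int)) (patt_score : List Int) (min_f max_f : Int) :
    List (List Int × Int × List (Int × Int)) :=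
  (bpatts.zip patt_score).foldl
    (fun jobs bs =>
      if min_f ≤ bs.1.sum ∧ bs.1.sum ≤ max_f then
        let cuts := (0 : Int) ::
          ((PySem.List.enumerate bs.1 0).filter (fun (p : Int × Int) => p.2 == 1)).map
            (fun p => p.1 + 1)
        jobs ++ [(bs.1, bs.2, cuts.zip cuts.tail)]
      else jobs)
    []

-- pass 2: each distinct coordinate pair resolved once; the stored value is Python's
-- None-or-mask, i.e. state_mask.get of the segment (int() is the identity on int)
def pvBuildTable (seq : List Int) (sm : PySem.Dict (List Int) (List Int))
    (jobs : List (List Int × Int × List (Int × Int))) :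
    PySem.Dict (Int × Int) (Option (List Int)) :=
  jobs.foldl
    (fun t job =>
      job.2.2.foldl
        (fun t p =>
          if t.contains p then t
          else t.insert p (sm.get? (PySem.List.slice seq (some p.1) (some p.2))))
        t)
    PySem.Dict.empty

def get_src_masks_py_alt (seq : List Int) (bpatts : List (List Int)) (cand_states : List (List Int)) (masks : List (List Int)) (min_f : Int) (max_f : Int) (patt_score : List Int) : List (List (List Int)) × List (List Int) × List (List Int) × List Int :=
  let sm := pvStateMask cand_states masks
  let jobs := pvJobs bpatts patt_score min_f max_f
  let table := pvBuildTable seq sm jobs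
  -- pass 3: assemble, all-or-nothing per pattern; table[p] exists for every job pair
  -- by construction (pass 2 covered them), so the .getD default is never read
  jobs.foldl
    (fun acc job =>
      let s_mask := job.2.2.map (fun p => (table.get? p).getD none)
      if s_mask ≠ [] ∧ (none : Option (List Int)) ∉ s_mask then
        (acc.1 ++ [s_mask.map (fun o => o.getD [])], acc.2.1 ++ [seq],
         acc.2.2.1 ++ [job.1], acc.2.2.2 ++ [job.2.1])
      else acc)
    ([], [], [], [])

-- ===== PRECONDITION & SPEC =====
-- Pre_ excludes the inputs on which the Python A raises an IndexError (seq[i] for a surviving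
-- pattern longer than seq; patt_score[k] / masks[idx] reachable only when some in-range pattern
-- emits at least one 1): the two guarded length bounds are slightly coarser than the exact crash
-- set, so they also drop some inputs on which A returns — on all of those B returns the same
-- value (see the cites in claim.json).
def Pre_get_src_masks_py (seq : List Int) (bpatts : List (List Int)) (cand_states : List (List Int)) (masks : List (List Int)) (min_f : Int) (max_f : Int) (patt_score : List Int) : Prop :=
  ((∃ bp ∈ bpatts, (min_f ≤ bp.sum ∧ bp.sum ≤ max_f) ∧ (1 : Int) ∈ bp) →
    bpatts.length ≤ patt_score.length ∧ cand_states.length ≤ masks.length) ∧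
  ∀ bp ∈ bpatts, (min_f ≤ bp.sum ∧ bp.sum ≤ max_f) → bp.length ≤ seq.length
instance (seq : List Int) (bpatts : List (List Int)) (cand_states : List (List Int)) (masks : List (List Int)) (min_f : Int) (max_f : Int) (patt_score : List Int) : Decidable (Pre_get_src_masks_py seq bpatts cand_states masks min_f max_f patt_score) := by unfold Pre_get_src_masks_py; infer_instance

def pvWitness_get_src_masks_py : List Int × List (List Int) × List (List Int) × List (List Int) × Int × Int × List Int :=
  ([0, 1], [[1, 0]], [[0]], [[7]], 0, 2, [5])

def Spec_get_src_masks_py (seq : List Int) (bpatts : List (List Int)) (cand_states : List (List Int)) (masks : List (List Int)) (min_f : Int) (max_f : Int) (patt_score : List Int) (out : List (List (List Int)) × List (List Int) × List (List Int) × List Int) : Prop := out = get_src_masks_py_alt seq bpatts cand_states masks min_f max_f patt_score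
instance (seq : List Int) (bpatts : List (List Int)) (cand_states : List (List Int)) (masks : List (List Int)) (min_f : Int) (max_f : Int) (patt_score : List Int) (out : List (List (List Int)) × List (List Int) × List (List Int) × List Int) : Decidable (Spec_get_src_masks_py seq bpatts cand_states masks min_f max_f patt_score out) := by unfold Spec_get_src_masks_py; infer_instance

-- ===== CLAIM (what is proved, stated in full; the proofs are below) =====
def Claim_equal_get_src_masks_py : Prop := ∀ (seq : List Int) (bpatts : List (List Int)) (cand_states : List (List Int)) (masks : List (List Int)) (min_f : Int) (max_f : Int) (patt_score : List Int), Dom_get_src_masks_py seq bpatts cand_states masks min_f max_f patt_score → Pre_get_src_masks_py seq bpatts cand_states masks min_f max_f patt_score → Spec_get_src_masks_py seq bpatts cand_states masks min_f max_f patt_score (get_src_masks_py seq bpatts cand_states masks min_f max_f patt_score)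


-- ===== LEMMAS AND PROOFS =====

-- proof-side middle form: the segments of bp over seq, and their all-or-nothing lookup
def pvSegsFrom (seq : List Int) : List Int → Int → Int → List (List Int)
  | [], _, _ => []
  | b :: rest, i, start =>
    if b == 1 then
      PySem.List.slice seq (some start) (some (i + 1)) :: pvSegsFrom seq rest (i + 1) (i + 1)
    else pvSegsFrom seq rest (i + 1) start

def pvSegLook (cs masks : List (List Int)) : List (List Int) → Option (List (List Int))
  | [] => some []
  | seg :: rest =>
    match PySem.List.index? cs seg with
    | none => none
    | some k => (pvSegLook cs masks rest).map (fun l => masks.getD k [] :: l)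

-- proof-side form of B's cut pairs
def pvPairsFrom : List Int → Int → Int → List (Int × Int)
  | [], _, _ => []
  | b :: rest, j, start =>
    if b == 1 then (start, j + 1) :: pvPairsFrom rest (j + 1) (j + 1)
    else pvPairsFrom rest (j + 1) start

-- the value pass 2 stores for a coordinate pair
def pvV (seq : List Int) (sm : PySem.Dict (List Int) (List Int)) (p : Int × Int) :
    Option (List Int) :=
  sm.get? (PySem.List.slice seq (some p.1) (some p.2))

theorem pv_slice_nil (seq : List Int) (i : Int) (h : 0 ≤ i) :
    PySem.List.slice seq (some i) (some i) = [] := by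
  rw [PySem.List.slice_toNat seq h h]
  simp

theorem pv_slice_snoc (seq : List Int) {start i : Int} (h0 : 0 ≤ start) (h1 : start ≤ i)
    (h2 : i < (seq.length : Int)) :
    PySem.List.slice seq (some start) (some (i + 1)) =
      PySem.List.slice seq (some start) (some i) ++ [PySem.List.pyGetD seq i 0] := by
  have hi0 : (0 : Int) ≤ i := le_trans h0 h1
  have hiN : i.toNat < seq.length := by omega
  rw [PySem.List.slice_toNat seq h0 (by omega), PySem.List.slice_toNat seq h0 hi0]
  rw [PySem.List.pyGetD_eq_getElem seq 0 hi0 h2]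
  have hsub : (i + 1).toNat - start.toNat = (i.toNat - start.toNat) + 1 := by omega
  rw [hsub, List.take_add_one]
  congr 1
  rw [List.getElem?_drop, show start.toNat + (i.toNat - start.toNat) = i.toNat from by omega,
      List.getElem?_eq_getElem hiN]
  rfl

-- A's interleaved loop equals segment-cutting followed by the all-or-nothing lookup
theorem pv_aloop_eq (seq : List Int) (cs masks : List (List Int)) (bp : List Int) :
    ∀ (i start : Int) (s_mask : List (List Int)),
    0 ≤ start → start ≤ i → i + bp.length ≤ (seq.length : Int) →
    pvALoop seq cs masks bp i (PySem.List.slice seq (some start) (some i)) s_mask =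
      match pvSegLook cs masks (pvSegsFrom seq bp i start) with
      | none => []
      | some l => s_mask ++ l := by
  induction bp with
  | nil => intro i start s_mask _ _ _; simp [pvALoop, pvSegsFrom, pvSegLook]
  | cons b rest ih =>
    intro i start s_mask h0 h1 h2
    have hi : i < (seq.length : Int) := by
      simp only [List.length_cons] at h2; push_cast at h2; omega
    simp only [pvALoop, pvSegsFrom]
    rw [← pv_slice_snoc seq h0 h1 hi]
    by_cases hb : (b == 1) = true
    · rw [if_pos hb, if_pos hb]
      cases hidx : PySem.List.index? cs (PySem.List.slice seq (some start) (some (i + 1))) with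
      | none => simp only [pvSegLook]; rw [hidx]
      | some idx =>
        have hnil : PySem.List.slice seq (some (i + 1)) (some (i + 1)) = ([] : List Int) :=
          pv_slice_nil seq (i + 1) (by omega)
        have hih := ih (i + 1) (i + 1)
          (s_mask ++ [PySem.List.pyGetD masks ((idx : Nat) : Int) []]) (by omega) (le_refl _)
          (by simp only [List.length_cons] at h2; push_cast at h2 ⊢; omega)
        rw [hnil] at hih
        dsimp only
        rw [hih]
        simp only [pvSegLook, hidx, PySem.List.pyGetD_natCast]
        cases pvSegLook cs masks (pvSegsFrom seq rest (i + 1) (i + 1)) <;> simp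
    · rw [if_neg hb, if_neg hb]
      exact ih (i + 1) start s_mask h0 (by omega)
        (by simp only [List.length_cons] at h2; push_cast at h2 ⊢; omega)

-- the setdefault/zip-built dict looks up the FIRST occurrence, like list.index
theorem pv_sm_fold (cs : List (List Int)) :
    ∀ (ms : List (List Int)) (d : PySem.Dict (List Int) (List Int)) (s : List Int),
    cs.length ≤ ms.length →
    ((cs.zip ms).foldl (fun d p => d.setdefault p.1 p.2) d).get? s =
      match d.get? s with
      | some v => some v
      | none => (PySem.List.index? cs s).map (fun k => ms.getD k []) := by
  induction cs with
  | nil =>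
    intro ms d s _
    simp only [List.zip_nil_left, List.foldl_nil]
    cases h : d.get? s with
    | none => simp [PySem.List.index?]
    | some v => simp
  | cons c rest ih =>
    intro ms d s hlen
    cases ms with
    | nil => simp at hlen
    | cons m ms' =>
      rw [List.zip_cons_cons]
      simp only [List.foldl_cons]
      rw [ih ms' _ s (by simpa using hlen)]
      by_cases hc : s = c
      · subst hc
        rw [PySem.Dict.get?_setdefault_self, PySem.List.index?_cons_self]
        cases h : d.get? s with
        | some v => simp
        | none => simp
      · rw [PySem.Dict.get?_setdefault_of_ne _ _ hc,
            PySem.List.index?_cons_of_ne _ (fun he => hc he.symm)]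
        cases h : d.get? s with
        | some v => simp
        | none =>
          cases PySem.List.index? rest s with
          | none => simp
          | some k => simp

theorem pv_sm_get? (cs ms : List (List Int)) (s : List Int) (hlen : cs.length ≤ ms.length) :
    (pvStateMask cs ms).get? s = (PySem.List.index? cs s).map (fun k => ms.getD k []) := by
  unfold pvStateMask
  rw [pv_sm_fold cs ms _ s hlen]
  simp [PySem.Dict.get?_empty]

-- B's cuts/zip pair list is pvPairsFrom
theorem pv_cuts_eq (bp : List Int) :
    ∀ (j start : Int),
    ((start :: ((PySem.List.enumerate bp j).filter (fun (p : Int × Int) => p.2 == 1)).map (fun p => p.1 + 1)).zip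
      (((PySem.List.enumerate bp j).filter (fun (p : Int × Int) => p.2 == 1)).map (fun p => p.1 + 1))) =
    pvPairsFrom bp j start := by
  induction bp with
  | nil => intro j start; simp [PySem.List.enumerate_nil, pvPairsFrom]
  | cons b rest ih =>
    intro j start
    rw [PySem.List.enumerate_cons]
    by_cases hb : (b == 1) = true
    · simp only [List.filter_cons, hb, if_pos, List.map_cons, pvPairsFrom, List.zip_cons_cons]
      rw [← ih (j + 1) (j + 1)]
    · simp only [List.filter_cons, hb, pvPairsFrom, Bool.false_eq_true, if_false]
      exact ih (j + 1) start

-- the stored values over a pattern's pairs are the state lookups of its segments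
theorem pv_pairs_map_v (seq : List Int) (sm : PySem.Dict (List Int) (List Int)) (bp : List Int) :
    ∀ (j start : Int),
    (pvPairsFrom bp j start).map (pvV seq sm) =
      (pvSegsFrom seq bp j start).map (fun seg => sm.get? seg) := by
  induction bp with
  | nil => intro j start; rfl
  | cons b rest ih =>
    intro j start
    simp only [pvPairsFrom, pvSegsFrom]
    by_cases hb : (b == 1) = true
    · rw [if_pos hb, if_pos hb]
      simp only [List.map_cons, ih (j + 1) (j + 1)]
      rfl
    · rw [if_neg hb, if_neg hb]
      exact ih (j + 1) start

-- pvSegLook as a gate over the per-segment state lookups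
theorem pv_seglook_char (cs masks : List (List Int)) (hlen : cs.length ≤ masks.length) :
    ∀ (segs : List (List Int)),
    pvSegLook cs masks segs =
      if (none : Option (List Int)) ∈ segs.map (fun seg => (pvStateMask cs masks).get? seg) then
        none
      else some ((segs.map (fun seg => (pvStateMask cs masks).get? seg)).map (fun o => o.getD [])) := by
  intro segs
  induction segs with
  | nil => simp [pvSegLook]
  | cons seg rest ih =>
    simp only [pvSegLook, List.map_cons, List.mem_cons]
    rw [pv_sm_get? cs masks seg hlen]
    cases hidx : PySem.List.index? cs seg with
    | none => simp
    | some k =>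
      simp only [Option.map_some, ih]
      by_cases hmem : (none : Option (List Int)) ∈ rest.map (fun seg => (pvStateMask cs masks).get? seg)
      · simp [hmem]
      · simp [hmem]

-- closed form of pass 1
theorem pv_jobs_fold (min_f max_f : Int) :
    ∀ (zl : List (List Int × Int)) (js : List (List Int × Int × List (Int × Int))),
    zl.foldl
      (fun jobs bs =>
        if min_f ≤ bs.1.sum ∧ bs.1.sum ≤ max_f then
          let cuts := (0 : Int) ::
            ((PySem.List.enumerate bs.1 0).filter (fun (p : Int × Int) => p.2 == 1)).map
              (fun p => p.1 + 1)
          jobs ++ [(bs.1, bs.2, cuts.zip cuts.tail)]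
        else jobs)
      js =
    js ++ (zl.filter (fun bs => decide (min_f ≤ bs.1.sum ∧ bs.1.sum ≤ max_f))).map
      (fun bs => (bs.1, bs.2, pvPairsFrom bs.1 0 0)) := by
  have hf : (fun (jobs : List (List Int × Int × List (Int × Int))) (bs : List Int × Int) =>
      if min_f ≤ bs.1.sum ∧ bs.1.sum ≤ max_f then
        let cuts := (0 : Int) ::
          ((PySem.List.enumerate bs.1 0).filter (fun (p : Int × Int) => p.2 == 1)).map
            (fun p => p.1 + 1)
        jobs ++ [(bs.1, bs.2, cuts.zip cuts.tail)]
      else jobs) =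
      (fun (jobs : List (List Int × Int × List (Int × Int))) (bs : List Int × Int) =>
        if min_f ≤ bs.1.sum ∧ bs.1.sum ≤ max_f then
          jobs ++ [(bs.1, bs.2, pvPairsFrom bs.1 0 0)]
        else jobs) := by
    funext jobs bs
    by_cases hs : min_f ≤ bs.1.sum ∧ bs.1.sum ≤ max_f
    · rw [if_pos hs, if_pos hs]
      simp only [List.tail_cons, pv_cuts_eq bs.1 0 0]
    · rw [if_neg hs, if_neg hs]
  intro zl
  rw [hf]
  induction zl with
  | nil => intro js; simp
  | cons bs rest ih =>
    intro js
    rw [List.foldl_cons, List.filter_cons]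
    by_cases hs : min_f ≤ bs.1.sum ∧ bs.1.sum ≤ max_f
    · rw [if_pos hs, ih (js ++ [(bs.1, bs.2, pvPairsFrom bs.1 0 0)])]
      simp [decide_eq_true hs]
    · rw [if_neg hs, ih js]
      simp [decide_eq_false hs]

-- pass 2 over one pair list: every processed pair reads back as its stored value
theorem pv_tbl_fold (seq : List Int) (sm : PySem.Dict (List Int) (List Int)) :
    ∀ (L : List (Int × Int)) (t : PySem.Dict (Int × Int) (Option (List Int))) (q : Int × Int),
    (∀ q', t.get? q' = none ∨ t.get? q' = some (pvV seq sm q')) →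
    (L.foldl
      (fun t p =>
        if t.contains p then t
        else t.insert p (sm.get? (PySem.List.slice seq (some p.1) (some p.2))))
      t).get? q =
    (if q ∈ L ∨ (t.get? q).isSome then some (pvV seq sm q) else none) := by
  intro L
  induction L with
  | nil =>
    intro t q hinv
    simp only [List.foldl_nil, List.not_mem_nil, false_or]
    rcases hinv q with h | h
    · rw [h]
      simp
    · rw [h]
      simp [pvV]
  | cons p L' ih =>
    intro t q hinv
    simp only [List.foldl_cons]
    by_cases hc : t.contains p = true
    · rw [if_pos hc]
      rw [ih t q hinv]
      have hsome : (t.get? p).isSome = true := by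
        rw [← PySem.Dict.contains_eq_isSome_get?]
        exact hc
      simp only [List.mem_cons]
      by_cases h1 : q ∈ L' ∨ (t.get? q).isSome = true
      · rw [if_pos h1, if_pos (by tauto)]
      · rw [if_neg h1, if_neg (by
          intro hor
          rcases hor with (hq | hq) | hq
          · subst hq; exact h1 (Or.inr hsome)
          · exact h1 (Or.inl hq)
          · exact h1 (Or.inr hq))]
    · rw [if_neg hc]
      have hinv' : ∀ q',
          (t.insert p (sm.get? (PySem.List.slice seq (some p.1) (some p.2)))).get? q' = none ∨
          (t.insert p (sm.get? (PySem.List.slice seq (some p.1) (some p.2)))).get? q'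
            = some (pvV seq sm q') := by
        intro q'
        by_cases hq' : q' = p
        · subst hq'
          right
          rw [PySem.Dict.get?_insert_self]
          rfl
        · rw [PySem.Dict.get?_insert_of_ne _ _ hq']
          exact hinv q'
      rw [ih _ q hinv']
      by_cases hq : q = p
      · subst hq
        rw [if_pos (Or.inr (by rw [PySem.Dict.get?_insert_self]; rfl)),
            if_pos (Or.inl List.mem_cons_self)]
      · rw [PySem.Dict.get?_insert_of_ne _ _ hq]
        simp only [List.mem_cons]
        by_cases h1 : q ∈ L' ∨ (t.get? q).isSome = true
        · rw [if_pos h1, if_pos (by tauto)]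
        · rw [if_neg h1, if_neg (by
            intro hor
            rcases hor with (hq2 | hq2) | hq2
            · exact hq hq2
            · exact h1 (Or.inl hq2)
            · exact h1 (Or.inr hq2))]

-- pass 2 over the job list equals pass 2 over the flattened pair list
theorem pv_tbl_flat (seq : List Int) (sm : PySem.Dict (List Int) (List Int)) :
    ∀ (jobs : List (List Int × Int × List (Int × Int)))
      (t : PySem.Dict (Int × Int) (Option (List Int))),
    jobs.foldl
      (fun t job =>
        job.2.2.foldl
          (fun t p =>
            if t.contains p then t
            else t.insert p (sm.get? (PySem.List.slice seq (some p.1) (some p.2))))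
          t)
      t =
    (jobs.flatMap (fun job => job.2.2)).foldl
      (fun t p =>
        if t.contains p then t
        else t.insert p (sm.get? (PySem.List.slice seq (some p.1) (some p.2))))
      t := by
  intro jobs
  induction jobs with
  | nil => intro t; rfl
  | cons job rest ih =>
    intro t
    simp only [List.foldl_cons, List.flatMap_cons, List.foldl_append]
    exact ih _

-- coverage: pass 2 resolves every pair any job demands
theorem pv_tbl_cover (seq : List Int) (sm : PySem.Dict (List Int) (List Int))
    (jobs : List (List Int × Int × List (Int × Int))) (p : Int × Int)
    (hp : p ∈ jobs.flatMap (fun job => job.2.2)) :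
    (pvBuildTable seq sm jobs).get? p = some (pvV seq sm p) := by
  unfold pvBuildTable
  rw [pv_tbl_flat, pv_tbl_fold seq sm _ _ p (fun q' => Or.inl (PySem.Dict.get?_empty _)),
      if_pos (Or.inl hp)]

-- pass 3 over the jobs equals the fused middle fold
theorem pv_pass3 (seq : List Int) (cs masks : List (List Int)) (min_f max_f : Int)
    (tbl : PySem.Dict (Int × Int) (Option (List Int))) (hlen : cs.length ≤ masks.length) :
    ∀ (zl : List (List Int × Int))
      (acc : List (List (List Int)) × List (List Int) × List (List Int) × List Int),
    (∀ bs ∈ zl, (min_f ≤ bs.1.sum ∧ bs.1.sum ≤ max_f) →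
      ∀ p ∈ pvPairsFrom bs.1 0 0, tbl.get? p = some (pvV seq (pvStateMask cs masks) p)) →
    ((zl.filter (fun bs => decide (min_f ≤ bs.1.sum ∧ bs.1.sum ≤ max_f))).map
      (fun bs => (bs.1, bs.2, pvPairsFrom bs.1 0 0))).foldl
      (fun acc job =>
        let s_mask := job.2.2.map (fun p => (tbl.get? p).getD none)
        if s_mask ≠ [] ∧ (none : Option (List Int)) ∉ s_mask then
          (acc.1 ++ [s_mask.map (fun o => o.getD [])], acc.2.1 ++ [seq],
           acc.2.2.1 ++ [job.1], acc.2.2.2 ++ [job.2.1])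
        else acc)
      acc =
    zl.foldl
      (fun acc bs =>
        if min_f ≤ bs.1.sum ∧ bs.1.sum ≤ max_f then
          match pvSegLook cs masks (pvSegsFrom seq bs.1 0 0) with
          | some (m :: ms) =>
            (acc.1 ++ [m :: ms], acc.2.1 ++ [seq], acc.2.2.1 ++ [bs.1], acc.2.2.2 ++ [bs.2])
          | _ => acc
        else acc)
      acc := by
  intro zl
  induction zl with
  | nil => intro acc _; rfl
  | cons bs rest ih =>
    intro acc hcov
    have hcrest : ∀ bs' ∈ rest, (min_f ≤ bs'.1.sum ∧ bs'.1.sum ≤ max_f) →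
        ∀ p ∈ pvPairsFrom bs'.1 0 0, tbl.get? p = some (pvV seq (pvStateMask cs masks) p) :=
      fun bs' h' => hcov bs' (List.mem_cons_of_mem _ h')
    rw [List.filter_cons]
    by_cases hs : min_f ≤ bs.1.sum ∧ bs.1.sum ≤ max_f
    · rw [if_pos (decide_eq_true hs), List.map_cons, List.foldl_cons, List.foldl_cons,
          if_pos hs]
      have hsm : (pvPairsFrom bs.1 0 0).map (fun p => (tbl.get? p).getD none) =
          (pvSegsFrom seq bs.1 0 0).map (fun seg => (pvStateMask cs masks).get? seg) := by
        rw [← pv_pairs_map_v seq (pvStateMask cs masks) bs.1 0 0]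
        exact List.map_congr_left (fun p hp => by
          rw [hcov bs List.mem_cons_self hs p hp]
          rfl)
      rw [hsm, pv_seglook_char cs masks hlen]
      generalize (pvSegsFrom seq bs.1 0 0).map (fun seg => (pvStateMask cs masks).get? seg) = os
      cases os with
      | nil =>
        rw [if_neg (by intro hand; exact hand.1 rfl)]
        exact ih acc hcrest
      | cons o os' =>
        by_cases hmem : (none : Option (List Int)) ∈ o :: os'
        · rw [if_pos hmem, if_neg (fun hand => hand.2 hmem)]
          exact ih acc hcrest
        · rw [if_neg hmem, if_pos ⟨by simp, hmem⟩]
          exact ih _ hcrest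
    · rw [if_neg (by simp [hs]), List.foldl_cons, if_neg hs]
      exact ih acc hcrest

-- a pattern without any 1 produces no cut pairs …
theorem pv_no_one_pairsFrom (bp : List Int) (h : (1 : Int) ∉ bp) :
    ∀ (j start : Int), pvPairsFrom bp j start = [] := by
  induction bp with
  | nil => intro j start; rfl
  | cons b rest ih =>
    intro j start
    have hb : ¬ ((b == 1) = true) := by
      simp only [beq_iff_eq]
      intro hb1
      exact h (by simp [hb1])
    simp only [pvPairsFrom, if_neg hb]
    exact ih (fun hm => h (List.mem_cons_of_mem _ hm)) _ _

-- … and no mask list in A's inner loop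
theorem pv_no_one_aloop (seq : List Int) (cs masks : List (List Int)) (bp : List Int)
    (h : (1 : Int) ∉ bp) :
    ∀ (i : Int) (cstate : List Int) (s_mask : List (List Int)),
    pvALoop seq cs masks bp i cstate s_mask = s_mask := by
  induction bp with
  | nil => intro i cstate s_mask; rfl
  | cons b rest ih =>
    intro i cstate s_mask
    have hb : ¬ ((b == 1) = true) := by
      simp only [beq_iff_eq]
      intro hb1
      exact h (by simp [hb1])
    simp only [pvALoop, if_neg hb]
    exact ih (fun hm => h (List.mem_cons_of_mem _ hm)) _ _ _

-- outer loop: A's enumerate-fold equals the fused middle fold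
theorem pv_outer (seq : List Int) (cs masks : List (List Int)) (min_f max_f : Int)
    (patt_score : List Int) :
    ∀ (bps : List (List Int)) (k : Nat)
      (acc : List (List (List Int)) × List (List Int) × List (List Int) × List Int),
    k + bps.length ≤ patt_score.length →
    (∀ bp ∈ bps, (min_f ≤ bp.sum ∧ bp.sum ≤ max_f) → bp.length ≤ seq.length) →
    (PySem.List.enumerate bps (k : Int)).foldl
      (fun acc kbp =>
        let emi_num := kbp.2.sum
        if emi_num < min_f ∨ emi_num > max_f then acc
        else
          let s_mask := pvALoop seq cs masks kbp.2 0 [] []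
          if s_mask.length > 0 then
            (acc.1 ++ [s_mask], acc.2.1 ++ [seq], acc.2.2.1 ++ [kbp.2],
             acc.2.2.2 ++ [PySem.List.pyGetD patt_score kbp.1 0])
          else acc)
      acc =
    (bps.zip (patt_score.drop k)).foldl
      (fun acc bs =>
        if min_f ≤ bs.1.sum ∧ bs.1.sum ≤ max_f then
          match pvSegLook cs masks (pvSegsFrom seq bs.1 0 0) with
          | some (m :: ms) =>
            (acc.1 ++ [m :: ms], acc.2.1 ++ [seq], acc.2.2.1 ++ [bs.1], acc.2.2.2 ++ [bs.2])
          | _ => acc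
        else acc)
      acc := by
  intro bps
  induction bps with
  | nil => intro k acc _ _; simp [PySem.List.enumerate_nil]
  | cons bp rest ih =>
    intro k acc hk hmem
    have hklt : k < patt_score.length := by
      simp only [List.length_cons] at hk
      omega
    have hcast : ((k : Int) + 1) = ((k + 1 : Nat) : Int) := by push_cast; ring
    have hrest : ∀ bp' ∈ rest, (min_f ≤ bp'.sum ∧ bp'.sum ≤ max_f) → bp'.length ≤ seq.length :=
      fun bp' h' => hmem bp' (List.mem_cons_of_mem _ h')
    have hkrest : (k + 1) + rest.length ≤ patt_score.length := by
      simp only [List.length_cons] at hk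
      omega
    rw [PySem.List.enumerate_cons, List.drop_eq_getElem_cons hklt]
    simp only [List.zip_cons_cons, List.foldl_cons]
    by_cases hs : min_f ≤ bp.sum ∧ bp.sum ≤ max_f
    · rw [if_neg (by omega), if_pos hs]
      have hlenbp : bp.length ≤ seq.length := hmem bp List.mem_cons_self hs
      have hmask : pvALoop seq cs masks bp 0 [] [] =
          match pvSegLook cs masks (pvSegsFrom seq bp 0 0) with
          | none => []
          | some l => l := by
        have h00 : PySem.List.slice seq (some 0) (some 0) = ([] : List Int) :=
          pv_slice_nil seq 0 le_rfl
        have h1 := pv_aloop_eq seq cs masks bp 0 0 [] le_rfl le_rfl (by omega)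
        rw [h00] at h1
        rw [h1]
        cases pvSegLook cs masks (pvSegsFrom seq bp 0 0) <;> simp
      have hscore : PySem.List.pyGetD patt_score ((k : Int)) 0 = patt_score[k] := by
        rw [PySem.List.pyGetD_natCast]
        exact List.getD_eq_getElem _ _ hklt
      cases hlk : pvSegLook cs masks (pvSegsFrom seq bp 0 0) with
      | none =>
        rw [hmask, hlk]
        simp only [List.length_nil, gt_iff_lt, lt_irrefl, if_false]
        rw [hcast]
        exact ih (k + 1) acc hkrest hrest
      | some l =>
        cases l with
        | nil =>
          rw [hmask, hlk]
          simp only [List.length_nil, gt_iff_lt, lt_irrefl, if_false]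
          rw [hcast]
          exact ih (k + 1) acc hkrest hrest
        | cons m ms =>
          rw [hmask, hlk]
          simp only [List.length_cons, gt_iff_lt]
          rw [if_pos (by omega), hscore, hcast]
          exact ih (k + 1) _ hkrest hrest
    · rw [if_pos (by omega), if_neg hs, hcast]
      exact ih (k + 1) acc hkrest hrest

-- if no pattern both passes the filter and emits a 1, A's loop appends nothing
theorem pv_a_skip (seq : List Int) (cs masks : List (List Int)) (min_f max_f : Int)
    (patt_score : List Int) :
    ∀ (bps : List (List Int)),
    (∀ bp ∈ bps, ¬ ((min_f ≤ bp.sum ∧ bp.sum ≤ max_f) ∧ (1 : Int) ∈ bp)) →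
    ∀ (j : Int) (acc : List (List (List Int)) × List (List Int) × List (List Int) × List Int),
    (PySem.List.enumerate bps j).foldl
      (fun acc kbp =>
        let emi_num := kbp.2.sum
        if emi_num < min_f ∨ emi_num > max_f then acc
        else
          let s_mask := pvALoop seq cs masks kbp.2 0 [] []
          if s_mask.length > 0 then
            (acc.1 ++ [s_mask], acc.2.1 ++ [seq], acc.2.2.1 ++ [kbp.2],
             acc.2.2.2 ++ [PySem.List.pyGetD patt_score kbp.1 0])
          else acc)
      acc = acc := by
  intro bps
  induction bps with
  | nil => intro _ j acc; rw [PySem.List.enumerate_nil, List.foldl_nil]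
  | cons bp rest ih =>
    intro h j acc
    rw [PySem.List.enumerate_cons]
    simp only [List.foldl_cons]
    have hrest : ∀ bp' ∈ rest, ¬ ((min_f ≤ bp'.sum ∧ bp'.sum ≤ max_f) ∧ (1 : Int) ∈ bp') :=
      fun bp' h' => h bp' (List.mem_cons_of_mem _ h')
    by_cases hs : min_f ≤ bp.sum ∧ bp.sum ≤ max_f
    · have h1 : (1 : Int) ∉ bp := fun hm => h bp List.mem_cons_self ⟨hs, hm⟩
      rw [if_neg (by omega), pv_no_one_aloop seq cs masks bp h1, if_neg (by simp)]
      exact ih hrest _ _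
    · rw [if_pos (by omega)]
      exact ih hrest _ _

-- … and B's pass 3 appends nothing either (every job's pair list is empty)
theorem pv_b_skip (seq : List Int)
    (tbl : PySem.Dict (Int × Int) (Option (List Int))) :
    ∀ (jobs : List (List Int × Int × List (Int × Int)))
      (acc : List (List (List Int)) × List (List Int) × List (List Int) × List Int),
    (∀ job ∈ jobs, job.2.2 = []) →
    jobs.foldl
      (fun acc job =>
        let s_mask := job.2.2.map (fun p => (tbl.get? p).getD none)
        if s_mask ≠ [] ∧ (none : Option (List Int)) ∉ s_mask then
          (acc.1 ++ [s_mask.map (fun o => o.getD [])], acc.2.1 ++ [seq],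
           acc.2.2.1 ++ [job.1], acc.2.2.2 ++ [job.2.1])
        else acc)
      acc = acc := by
  intro jobs
  induction jobs with
  | nil => intro acc _; rfl
  | cons job rest ih =>
    intro acc h
    simp only [List.foldl_cons]
    rw [h job List.mem_cons_self]
    simp only [List.map_nil, ne_eq, not_true_eq_false, false_and, if_false]
    exact ih acc (fun j hj => h j (List.mem_cons_of_mem _ hj))

-- ===== VERDICT (by name: the statement is the Claim_ definition above) =====
theorem get_src_masks_py_spec : Claim_equal_get_src_masks_py := by
  intro seq bpatts cand_states masks min_f max_f patt_score _hdom hpre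
  obtain ⟨hguard, hmem⟩ := hpre
  have hjobs := pv_jobs_fold min_f max_f (bpatts.zip patt_score) []
  rw [List.nil_append] at hjobs
  by_cases hprod : ∃ bp ∈ bpatts, (min_f ≤ bp.sum ∧ bp.sum ≤ max_f) ∧ (1 : Int) ∈ bp
  · obtain ⟨hps, hmask⟩ := hguard hprod
    have hcov : ∀ bs ∈ bpatts.zip patt_score, (min_f ≤ bs.1.sum ∧ bs.1.sum ≤ max_f) →
        ∀ p ∈ pvPairsFrom bs.1 0 0,
        (pvBuildTable seq (pvStateMask cand_states masks)
          (pvJobs bpatts patt_score min_f max_f)).get? p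
          = some (pvV seq (pvStateMask cand_states masks) p) := by
      intro bs hbs hsurv p hp
      apply pv_tbl_cover
      unfold pvJobs
      rw [hjobs]
      exact List.mem_flatMap.mpr ⟨(bs.1, bs.2, pvPairsFrom bs.1 0 0),
        List.mem_map.mpr ⟨bs, List.mem_filter.mpr ⟨hbs, decide_eq_true hsurv⟩, rfl⟩, hp⟩
    have hB : get_src_masks_py_alt seq bpatts cand_states masks min_f max_f patt_score =
        (bpatts.zip patt_score).foldl
          (fun acc bs =>
            if min_f ≤ bs.1.sum ∧ bs.1.sum ≤ max_f then
              match pvSegLook cand_states masks (pvSegsFrom seq bs.1 0 0) with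
              | some (m :: ms) =>
                (acc.1 ++ [m :: ms], acc.2.1 ++ [seq], acc.2.2.1 ++ [bs.1],
                 acc.2.2.2 ++ [bs.2])
              | _ => acc
            else acc)
          ([], [], [], []) := by
      unfold get_src_masks_py_alt
      rw [show pvJobs bpatts patt_score min_f max_f =
          ((bpatts.zip patt_score).filter
            (fun bs => decide (min_f ≤ bs.1.sum ∧ bs.1.sum ≤ max_f))).map
            (fun bs => (bs.1, bs.2, pvPairsFrom bs.1 0 0)) from hjobs]
      rw [pv_pass3 seq cand_states masks min_f max_f _ hmask (bpatts.zip patt_score)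
        ([], [], [], []) (by rw [← hjobs]; exact hcov)]
    have hA := pv_outer seq cand_states masks min_f max_f patt_score bpatts 0
      ([], [], [], []) (by omega) hmem
    simp only [List.drop_zero, Nat.cast_zero] at hA
    unfold Spec_get_src_masks_py
    rw [hB]
    unfold get_src_masks_py
    exact hA
  · have hnone : ∀ bp ∈ bpatts, ¬ ((min_f ≤ bp.sum ∧ bp.sum ≤ max_f) ∧ (1 : Int) ∈ bp) :=
      fun bp hbp hc => hprod ⟨bp, hbp, hc⟩
    have hA : get_src_masks_py seq bpatts cand_states masks min_f max_f patt_score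
        = ([], [], [], []) := by
      unfold get_src_masks_py
      exact pv_a_skip seq cand_states masks min_f max_f patt_score bpatts hnone 0 _
    have hB : get_src_masks_py_alt seq bpatts cand_states masks min_f max_f patt_score
        = ([], [], [], []) := by
      unfold get_src_masks_py_alt
      apply pv_b_skip
      intro job hjob
      unfold pvJobs at hjob
      rw [hjobs] at hjob
      obtain ⟨bs, hbs, rfl⟩ := List.mem_map.mp hjob
      have hbs' := List.mem_filter.mp hbs
      have hsurv := of_decide_eq_true hbs'.2
      have hbp : bs.1 ∈ bpatts := (List.of_mem_zip hbs'.1).1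
      have h1 : (1 : Int) ∉ bs.1 := fun hm => hprod ⟨bs.1, hbp, hsurv, hm⟩
      exact pv_no_one_pairsFrom bs.1 h1 0 0
    unfold Spec_get_src_masks_py
    rw [hA, hB]
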